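-- pv_equiv track=rewrite | github.com/ChrisSteinbach/RationalRecipes | src/rational_recipes/scrape/ner_match.py | resolve_ner_for_line
-- ===== SOURCE A (Python) =====
-- from collections.abc import Sequence
--
-- def resolve_ner_for_line(
--     raw_line: str,
--     ner_list: Sequence[str],
-- ) -> str | None:
--     """Pick the best NER candidate for a raw ingredient line.
--
--     Returns the longest NER value (case-insensitive) that appears as a
--     substring of ``raw_line``. When multiple NER values tie for longest,
--     or when none match, returns ``None`` so the caller can fall back to
--     the regex+USDA / LLM path.
--
--     Empty / whitespace-only NER values are skipped — RecipeNLG's NER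
--     column occasionally carries blanks.
--     """
--     if not raw_line or not ner_list:
--         return None
--
--     lower_line = raw_line.lower()
--     longest_length = 0
--     # Track distinct candidates by their lowercased form so the same NER
--     # noun appearing twice in a recipe (e.g. ``vanilla`` for both an
--     # extract and a sugar entry) doesn't read as a tie. Distinct-spelling
--     # ties still defeat the matcher and route the line to the LLM.
--     distinct_at_longest: dict[str, str] = {}
--
--     for ner in ner_list:
--         if not ner:
--             continue
--         ner_normalized = ner.strip()
--         if not ner_normalized:
--             continue
--         ner_lower = ner_normalized.lower()
--         if ner_lower not in lower_line:
--             continue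
--         length = len(ner_lower)
--         if length > longest_length:
--             longest_length = length
--             distinct_at_longest = {ner_lower: ner_normalized}
--         elif length == longest_length:
--             distinct_at_longest.setdefault(ner_lower, ner_normalized)
--
--     # Tie at longest length on DISTINCT spellings is ambiguous — return
--     # None so the LLM gets a chance. Same-spelling repeats collapse and
--     # resolve as a single candidate.
--     if len(distinct_at_longest) == 1:
--         return next(iter(distinct_at_longest.values()))
--     return None
-- ===== SOURCE B (Python) =====
-- def resolve_ner_for_line(raw_line, ner_list):
--     lower_line = raw_line.lower()
--     matches = {}
--     for ner in ner_list:
--         if not ner: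
--             continue
--         norm = ner.strip()
--         if not norm:
--             continue
--         low = norm.lower()
--         if low in lower_line:
--             matches.setdefault(low, norm)
--     if not matches:
--         return None
--     best = max(len(k) for k in matches)
--     winners = [v for k, v in matches.items() if len(k) == best]
--     return winners[0] if len(winners) == 1 else None
-- ===== Notes on version B (the rewrite author's own statement) =====
-- stated objective: alternative
-- what changed: Replaces A's incremental longest-length tracking (resetting/extending a dict of current leaders inside the loop) by a two-phase collect-then-aggregate structure: one pass builds a dict of ALL matching lowercased forms with their first-seen stripped spelling, then the max key length is computed and the unique winner (if any) selected.
import Mathlib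
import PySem

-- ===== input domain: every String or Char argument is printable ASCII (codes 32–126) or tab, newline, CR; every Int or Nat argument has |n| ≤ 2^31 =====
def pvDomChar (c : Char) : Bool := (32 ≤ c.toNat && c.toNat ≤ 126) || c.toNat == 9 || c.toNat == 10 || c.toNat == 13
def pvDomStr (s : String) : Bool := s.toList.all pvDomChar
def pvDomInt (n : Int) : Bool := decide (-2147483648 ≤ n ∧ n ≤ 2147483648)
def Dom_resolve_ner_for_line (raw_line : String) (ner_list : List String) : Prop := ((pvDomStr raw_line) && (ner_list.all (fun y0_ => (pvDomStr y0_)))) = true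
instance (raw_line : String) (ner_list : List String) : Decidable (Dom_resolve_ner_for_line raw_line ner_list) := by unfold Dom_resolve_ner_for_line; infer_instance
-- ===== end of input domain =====

-- B replaces A's incremental longest-tracking loop by collect-all-found then aggregate (max length, unique winner); same cost, alternative decomposition.

-- ===== PORT A =====
-- loop body of A's for-loop (state: longest_length, distinct_at_longest)
def pvStepA (lower_line : String) (st : Int × PySem.Dict String String) (ner : String) :
    Int × PySem.Dict String String :=
  if ner = "" then st else
  let norm := PySem.Str.strip ner
  if norm = "" then st else
  let low := PySem.Str.lower norm
  if !(PySem.Str.isIn low lower_line) then st else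
  let length := PySem.Str.len low
  if length > st.1 then (length, PySem.Dict.insert PySem.Dict.empty low norm)
  else if length = st.1 then (st.1, st.2.setdefault low norm)
  else st

def resolve_ner_for_line (raw_line : String) (ner_list : List String) : Option String :=
  if raw_line = "" ∨ ner_list = [] then none else
  let lower_line := PySem.Str.lower raw_line
  let st := ner_list.foldl (pvStepA lower_line) (0, PySem.Dict.empty)
  if st.2.size = 1 then st.2.values.head? else none

-- ===== PORT B =====
-- loop body of B's for-loop (state: the found dict of ALL matching forms)
def pvStepB (lower_line : String) (d : PySem.Dict String String) (ner : String) :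
    PySem.Dict String String :=
  if ner = "" then d else
  let norm := PySem.Str.strip ner
  if norm = "" then d else
  let low := PySem.Str.lower norm
  if PySem.Str.isIn low lower_line then d.setdefault low norm else d

def resolve_ner_for_line_alt (raw_line : String) (ner_list : List String) : Option String :=
  let lower_line := PySem.Str.lower raw_line
  let found := ner_list.foldl (pvStepB lower_line) PySem.Dict.empty
  if found.size = 0 then none else
  match PySem.List.max? (found.keys.map PySem.Str.len) (fun x => x) with
  | none => none
  | some best =>
    let winners := (found.items.filter (fun p => PySem.Str.len p.1 == best)).map Prod.snd
    if winners.length = 1 then winners.head? else none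

-- ===== PRECONDITION & SPEC =====
def Spec_resolve_ner_for_line (raw_line : String) (ner_list : List String) (out : Option String) : Prop := out = resolve_ner_for_line_alt raw_line ner_list
instance (raw_line : String) (ner_list : List String) (out : Option String) : Decidable (Spec_resolve_ner_for_line raw_line ner_list out) := by unfold Spec_resolve_ner_for_line; infer_instance

-- ===== CLAIM (what is proved, stated in full; the proofs are below) =====
def Claim_equal_resolve_ner_for_line : Prop := ∀ (raw_line : String) (ner_list : List String), Dom_resolve_ner_for_line raw_line ner_list → Spec_resolve_ner_for_line raw_line ner_list (resolve_ner_for_line raw_line ner_list)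

-- ===== LEMMAS AND PROOFS =====

-- the invariant linking A's loop state (L, dA) with B's loop state dB
def pvInv (L : Int) (dA dB : PySem.Dict String String) : Prop :=
  dA.items = dB.items.filter (fun p => PySem.Str.len p.1 == L) ∧
  (∀ p ∈ dB.items, 1 ≤ PySem.Str.len p.1 ∧ PySem.Str.len p.1 ≤ L) ∧
  (dB.items ≠ [] → ∃ p ∈ dB.items, PySem.Str.len p.1 = L) ∧
  (dB.items = [] → L = 0)

theorem pvInv_init : pvInv 0 PySem.Dict.empty PySem.Dict.empty := by
  refine ⟨rfl, ?_, ?_, ?_⟩ <;> simp [PySem.Dict.empty]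

theorem pvInv_step (lower_line : String) (L : Int) (dA dB : PySem.Dict String String)
    (h : pvInv L dA dB) (ner : String) :
    pvInv (pvStepA lower_line (L, dA) ner).1 (pvStepA lower_line (L, dA) ner).2
      (pvStepB lower_line dB ner) := by
  obtain ⟨h1, h2, h3, h4⟩ := h
  by_cases hn1 : ner = ""
  · simp only [pvStepA, pvStepB, if_pos hn1]
    exact ⟨h1, h2, h3, h4⟩
  by_cases hn2 : PySem.Str.strip ner = ""
  · simp only [pvStepA, pvStepB, if_neg hn1]
    simp only [if_pos hn2]
    exact ⟨h1, h2, h3, h4⟩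
  by_cases hin : PySem.Str.isIn (PySem.Str.lower (PySem.Str.strip ner)) lower_line = true
  case neg =>
    simp only [pvStepA, pvStepB, if_neg hn1]
    simp only [if_neg hn2, eq_false_of_ne_true hin, Bool.not_false, if_true,
      Bool.false_eq_true, if_false]
    exact ⟨h1, h2, h3, h4⟩
  case pos =>
    simp only [pvStepA, pvStepB, if_neg hn1]
    simp only [if_neg hn2, hin, Bool.not_true, if_true, Bool.false_eq_true, if_false]
    set low := PySem.Str.lower (PySem.Str.strip ner) with hlowdef
    set l := PySem.Str.len low with hldef
    have hpos : 1 ≤ l := by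
      rw [hldef, hlowdef]
      have hne : (PySem.Str.strip ner).toList ≠ [] := by
        intro hx
        apply hn2
        rw [← String.toList_inj]
        simpa using hx
      rw [PySem.Str.len_eq, PySem.Str.toList_lower]
      have hll : (PySem.Chars.lower (PySem.Str.strip ner).toList).length
          = (PySem.Str.strip ner).toList.length := by
        simp [PySem.Chars.lower]
      rw [hll]
      have := List.length_pos_iff.mpr hne
      omega
    have hkeymem : ∀ k : String, dB.contains k = true ↔ ∃ q ∈ dB.items, q.1 = k := by
      intro k
      rw [PySem.Dict.contains_iff_mem_keys]
      simp [PySem.Dict.keys]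
    rcases lt_trichotomy L l with hlt | heq | hgt
    · -- new strictly longer match: A resets, B appends
      have hbig : l > L := hlt
      simp only [if_pos hbig]
      have hnc : dB.contains low = false := by
        rw [Bool.eq_false_iff]
        intro hc
        rcases (hkeymem low).mp hc with ⟨q, hq, hq1⟩
        have := (h2 q hq).2
        rw [hq1] at this
        omega
      rw [PySem.Dict.setdefault_of_not_contains _ _ hnc]
      have hBi : (dB.insert low (PySem.Str.strip ner)).items = dB.items ++ [(low, PySem.Str.strip ner)] :=
        PySem.Dict.items_insert_of_not_contains _ _ hnc
      have hAi : (PySem.Dict.empty.insert low (PySem.Str.strip ner)).items = [(low, PySem.Str.strip ner)] := by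
        rw [PySem.Dict.items_insert_of_not_contains _ _ (PySem.Dict.contains_empty _)]
        rfl
      unfold pvInv
      refine ⟨?_, ?_, ?_, ?_⟩
      · rw [hBi, hAi, List.filter_append]
        have hf : dB.items.filter (fun p => PySem.Str.len p.1 == l) = [] := by
          rw [List.filter_eq_nil_iff]
          intro q hq
          have := (h2 q hq).2
          simp only [beq_iff_eq]
          omega
        have hbt : (PySem.Str.len low == l) = true := by
          rw [beq_iff_eq]
        simp only [hf, List.nil_append, List.filter_cons, hbt, if_true, List.filter_nil]
      · intro q hq
        rw [hBi] at hq
        rcases List.mem_append.mp hq with hq | hq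
        · have := h2 q hq; omega
        · simp at hq
          subst hq
          dsimp only
          omega
      · intro _
        refine ⟨(low, PySem.Str.strip ner), ?_, rfl⟩
        rw [hBi]; simp
      · intro hemp
        rw [hBi] at hemp
        simp at hemp
    · -- equal length: both setdefault
      have hble : ¬ (l > L) := by omega
      have hbeq : l = L := heq.symm
      simp only [if_neg hble, if_pos hbeq]
      by_cases hc : dB.contains low = true
      · have hcA : dA.contains low = true := by
          rcases (hkeymem low).mp hc with ⟨q, hq, hq1⟩
          rw [PySem.Dict.contains_iff_mem_keys]
          simp only [PySem.Dict.keys, List.mem_map]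
          refine ⟨q, ?_, hq1⟩
          rw [h1, List.mem_filter]
          refine ⟨hq, ?_⟩
          simp only [beq_iff_eq]
          rw [hq1]
          omega
        rw [PySem.Dict.setdefault_of_contains _ _ hc, PySem.Dict.setdefault_of_contains _ _ hcA]
        exact ⟨h1, h2, h3, h4⟩
      · have hc' : dB.contains low = false := Bool.eq_false_iff.mpr hc
        have hcA : dA.contains low = false := by
          rw [Bool.eq_false_iff]
          intro hcc
          apply hc
          rw [PySem.Dict.contains_iff_mem_keys] at hcc ⊢
          simp only [PySem.Dict.keys, List.mem_map] at hcc ⊢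
          rcases hcc with ⟨q, hq, hq1⟩
          rw [h1, List.mem_filter] at hq
          exact ⟨q, hq.1, hq1⟩
        rw [PySem.Dict.setdefault_of_not_contains _ _ hc',
          PySem.Dict.setdefault_of_not_contains _ _ hcA]
        have hBi : (dB.insert low (PySem.Str.strip ner)).items = dB.items ++ [(low, PySem.Str.strip ner)] :=
          PySem.Dict.items_insert_of_not_contains _ _ hc'
        have hAi : (dA.insert low (PySem.Str.strip ner)).items = dA.items ++ [(low, PySem.Str.strip ner)] :=
          PySem.Dict.items_insert_of_not_contains _ _ hcA
        unfold pvInv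
        refine ⟨?_, ?_, ?_, ?_⟩
        · rw [hBi, hAi, List.filter_append, h1]
          congr 1
          have hbt : (PySem.Str.len low == L) = true := by
            rw [beq_iff_eq]
            omega
          simp only [List.filter_cons, hbt, if_true, List.filter_nil]
        · intro q hq
          rw [hBi] at hq
          rcases List.mem_append.mp hq with hq | hq
          · exact h2 q hq
          · simp at hq
            subst hq
            dsimp only
            omega
        · intro _
          refine ⟨(low, PySem.Str.strip ner), ?_, ?_⟩
          · rw [hBi]; simp
          · show PySem.Str.len low = L
            omega
        · intro hemp
          rw [hBi] at hemp
          simp at hemp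
    · -- shorter match: A unchanged, B setdefaults
      have hble : ¬ (l > L) := by omega
      have hbne : ¬ (l = L) := by omega
      simp only [if_neg hble, if_neg hbne]
      by_cases hc : dB.contains low = true
      · rw [PySem.Dict.setdefault_of_contains _ _ hc]
        exact ⟨h1, h2, h3, h4⟩
      · have hc' : dB.contains low = false := Bool.eq_false_iff.mpr hc
        rw [PySem.Dict.setdefault_of_not_contains _ _ hc']
        have hBi : (dB.insert low (PySem.Str.strip ner)).items = dB.items ++ [(low, PySem.Str.strip ner)] :=
          PySem.Dict.items_insert_of_not_contains _ _ hc'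
        have hne : dB.items ≠ [] := by
          intro hemp
          have := h4 hemp
          omega
        unfold pvInv
        refine ⟨?_, ?_, ?_, ?_⟩
        · rw [hBi, List.filter_append, h1]
          have hbt : (PySem.Str.len low == L) = false := by
            rw [beq_eq_false_iff_ne]
            omega
          simp only [List.filter_cons, hbt, if_false, List.filter_nil, List.append_nil,
            Bool.false_eq_true]
        · intro q hq
          rw [hBi] at hq
          rcases List.mem_append.mp hq with hq | hq
          · exact h2 q hq
          · simp at hq
            subst hq
            dsimp only
            omega
        · intro _
          rcases h3 hne with ⟨q, hq, hqL⟩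
          refine ⟨q, ?_, hqL⟩
          rw [hBi]
          exact List.mem_append_left _ hq
        · intro hemp
          rw [hBi] at hemp
          simp at hemp

theorem pvInv_fold (lower_line : String) (ls : List String) (L : Int)
    (dA dB : PySem.Dict String String) (h : pvInv L dA dB) :
    pvInv (ls.foldl (pvStepA lower_line) (L, dA)).1 (ls.foldl (pvStepA lower_line) (L, dA)).2
      (ls.foldl (pvStepB lower_line) dB) := by
  induction ls generalizing L dA dB with
  | nil => exact h
  | cons x t ih =>
    simpa using ih _ _ _ (pvInv_step lower_line L dA dB h x)

theorem pvStepB_empty_line (d : PySem.Dict String String) (ner : String) :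
    pvStepB (PySem.Str.lower "") d ner = d := by
  unfold pvStepB
  dsimp only
  split_ifs with h1 h2 h3
  · rfl
  · rfl
  · exfalso
    rw [PySem.Str.isIn_iff_infix] at h3
    have h3' : PySem.Chars.lower (PySem.Chars.strip ner.toList) <:+: ([] : List Char) := by
      simpa [PySem.Chars.lower] using h3
    have hz : PySem.Chars.lower (PySem.Chars.strip ner.toList) = [] :=
      List.eq_nil_of_infix_nil h3'
    have hn : PySem.Chars.strip ner.toList = [] := by
      have := hz
      simp [PySem.Chars.lower] at this
      simpa using this
    apply h2
    rw [← String.toList_inj]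
    rw [PySem.Str.toList_strip]
    simpa using hn
  · rfl

theorem pvFoldB_empty_line (ls : List String) (d : PySem.Dict String String) :
    ls.foldl (pvStepB (PySem.Str.lower "")) d = d := by
  induction ls generalizing d with
  | nil => rfl
  | cons x t ih => simpa [pvStepB_empty_line] using ih d

-- final aggregation: from the invariant, B's aggregation equals A's final check
theorem pvFinal (L : Int) (dA dB : PySem.Dict String String) (h : pvInv L dA dB) :
    (if dA.size = 1 then dA.values.head? else none) =
      (if dB.size = 0 then none else
        match PySem.List.max? (dB.keys.map PySem.Str.len) (fun x => x) with
        | none => none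
        | some best =>
          let winners := (dB.items.filter (fun p => PySem.Str.len p.1 == best)).map Prod.snd
          if winners.length = 1 then winners.head? else none) := by
  obtain ⟨h1, h2, h3, h4⟩ := h
  rcases hE : dB.items with - | ⟨p, t⟩
  · have hA : dA.items = [] := by rw [h1, hE]; rfl
    have hA0 : dA.size = 0 := by simp [PySem.Dict.size, hA]
    have hB0 : dB.size = 0 := by simp [PySem.Dict.size, hE]
    simp [hA0, hB0]
  · have hBs : ¬ dB.size = 0 := by simp [PySem.Dict.size, hE]
    rw [if_neg hBs]
    have hk : dB.keys.map PySem.Str.len =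
        PySem.Str.len p.1 :: t.map (fun q => PySem.Str.len q.1) := by
      simp [PySem.Dict.keys, hE]
    have hub : ∀ q ∈ dB.items, PySem.Str.len q.1 ≤ L := fun q hq => (h2 q hq).2
    have hmax : (t.map (fun q => PySem.Str.len q.1)).foldl max (PySem.Str.len p.1) = L := by
      apply le_antisymm
      · rcases PySem.List.foldl_max_mem (t.map (fun q => PySem.Str.len q.1)) (PySem.Str.len p.1)
          with hm | hm
        · rw [hm]; exact hub p (by rw [hE]; exact List.mem_cons_self)
        · rcases List.mem_map.mp hm with ⟨q, hq, hqe⟩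
          rw [← hqe]; exact hub q (by rw [hE]; exact List.mem_cons_of_mem _ hq)
      · rcases h3 (by rw [hE]; simp) with ⟨q, hq, hqL⟩
        rw [hE] at hq
        rcases List.mem_cons.mp hq with hq | hq
        · subst hq
          rw [← hqL]
          exact (PySem.List.le_foldl_max _ _).1
        · have : PySem.Str.len q.1 ∈ t.map (fun q => PySem.Str.len q.1) :=
            List.mem_map.mpr ⟨q, hq, rfl⟩
          rw [← hqL]
          exact (PySem.List.le_foldl_max _ _).2 _ this
    rw [hk, PySem.List.max?_id_cons, hmax]
    have hw : (dB.items.filter (fun p => PySem.Str.len p.1 == L)).map Prod.snd = dA.values := by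
      simp [PySem.Dict.values, h1]
    have hlen : dA.values.length = dA.size := by simp [PySem.Dict.values, PySem.Dict.size]
    dsimp only
    rw [← hE, hw, hlen]

-- ===== VERDICT (by name: the statement is the Claim_ definition above) =====
theorem resolve_ner_for_line_spec : Claim_equal_resolve_ner_for_line := by
  intro raw_line ner_list _
  unfold Spec_resolve_ner_for_line resolve_ner_for_line resolve_ner_for_line_alt
  by_cases hg : raw_line = "" ∨ ner_list = []
  · simp only [if_pos hg]
    rcases hg with hg | hg
    · subst hg
      rw [pvFoldB_empty_line]
      rfl
    · subst hg
      rfl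
  · simp only [if_neg hg]
    exact pvFinal _ _ _ (pvInv_fold _ _ _ _ _ pvInv_init)
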